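-- pv_equiv track=rewrite | github.com/1949K/F5-Conf-To-Horizon | web版本/core/function/ucs/lxl_package_3_ConfProcess/Conf_WriteToTxt.py | format_irule_as_tcl
-- ===== SOURCE A (Python) =====
-- def format_irule_as_tcl(content, indent_level=4):
--     """
--     将 iRule 内容格式化为符合 Tcl 规范的缩进格式，调整 `else` 和 `elseif` 的位置，
--     并将所有的 `}{` 替换为 `} {`。
--
--     :param content: 原始 iRule 内容（字符串）
--     :param indent_level: 每一级的缩进空格数，默认4
--     :return: 格式化后的 iRule 内容
--     """
--     formatted_lines = []
--     current_indent = 0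
--     indent = " " * indent_level
--     lines = content.splitlines()
--     i = 0
--
--     while i < len(lines):
--         line = lines[i].strip()
--
--         # 检查是否是结束的 "}" 并且下一行是 "else {" 或 "elseif {"
--         if line == '}' and i + 1 < len(lines):
--             next_line = lines[i + 1].strip()
--             if next_line.startswith('else') or next_line.startswith('elseif'):
--                 # 减少缩进级别，因为 "}" 应该与对应的 "if" 对齐
--                 current_indent -= 1
--                 # 构建合并后的行，如 "} else {" 或 "} elseif {"
--                 merged_line = f"}} {next_line}"
--                 formatted_lines.append(f"{indent * current_indent}{merged_line}")
--                 # 如果合并后的行以 "{" 结尾，增加缩进级别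
--                 if merged_line.endswith('{'):
--                     current_indent += 1
--                 i += 2  # 跳过下一行
--                 continue
--
--         # 如果是结束的 "}", 减少缩进级别
--         if line.startswith('}'):
--             current_indent -= 1
--
--         # 添加当前行，并根据当前缩进级别调整缩进
--         formatted_lines.append(f"{indent * current_indent}{line}")
--
--         # 如果是开始的 "{", 增加缩进级别
--         if line.endswith('{'):
--             current_indent += 1
--
--         i += 1
--
--     # 合并格式化后的行
--     formatted_content = "\n".join(formatted_lines)
--
--     # 替换所有的 "}{" 为 "} {"
--     formatted_content = formatted_content.replace('}{', '} {')
--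
--     return formatted_content
-- ===== SOURCE B (Python) =====
-- def format_irule_as_tcl(content, indent_level=4):
--     """Two-pass rewrite: pass 1 merges '}' with a following else/elseif line,
--     pass 2 reindents by brace counting; then '}{' -> '} {'."""
--     indent = " " * indent_level
--
--     # Pass 1: normalize to logical lines (merge '}' + else... into one line).
--     logical = []
--     lines = content.splitlines()
--     i = 0
--     while i < len(lines):
--         line = lines[i].strip()
--         if line == '}' and i + 1 < len(lines) and lines[i + 1].strip().startswith('else'):
--             logical.append("} " + lines[i + 1].strip())
--             i += 2
--         else:
--             logical.append(line)
--             i += 1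
--
--     # Pass 2: indent by brace structure.
--     out = []
--     current = 0
--     for line in logical:
--         if line.startswith('}'):
--             current -= 1
--         out.append(indent * current + line)
--         if line.endswith('{'):
--             current += 1
--
--     return "\n".join(out).replace('}{', '} {')
-- ===== Notes on version B (the rewrite author's own statement) =====
-- stated objective: alternative
-- what changed: A's single lookahead while-loop that merges '}'+else lines and reindents simultaneously is decomposed into two passes: a merge pass producing normalized logical lines, then a brace-counting indentation pass (and the redundant 'elseif' startswith test is dropped, since startswith('else') subsumes it).
import Mathlib
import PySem

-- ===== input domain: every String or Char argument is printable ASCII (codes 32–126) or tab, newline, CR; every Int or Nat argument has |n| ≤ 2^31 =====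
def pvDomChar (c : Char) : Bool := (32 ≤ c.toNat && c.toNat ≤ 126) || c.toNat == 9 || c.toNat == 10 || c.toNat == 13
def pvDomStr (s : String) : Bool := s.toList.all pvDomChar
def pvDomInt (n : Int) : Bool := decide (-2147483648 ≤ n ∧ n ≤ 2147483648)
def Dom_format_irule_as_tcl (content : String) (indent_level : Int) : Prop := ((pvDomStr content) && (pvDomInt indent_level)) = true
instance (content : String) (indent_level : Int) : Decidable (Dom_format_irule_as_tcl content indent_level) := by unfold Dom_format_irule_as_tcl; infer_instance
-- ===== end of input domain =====

-- B splits A's single lookahead loop (merge + indent at once) into two passes: a merge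
-- pass producing logical lines, then an indentation pass (objective: alternative decomposition).

-- shared helper: Python's (" " * indent_level) * current_indent (both factors clamp at 0)
def pvIndentStr (L : Int) (ci : Int) : String := String.ofList (List.replicate (L.toNat * ci.toNat) ' ')

-- ===== PORT A =====
-- A's while-loop over the line list with one-line lookahead, tracking current_indent
def pvLoopA (L : Int) : List String → Int → List String
  | [], _ => []
  | [l], ci =>
    let line := PySem.Str.strip l
    let ci1 := if PySem.Str.startswith line "}" then ci - 1 else ci
    let ci2 := if PySem.Str.endswith line "{" then ci1 + 1 else ci1
    (pvIndentStr L ci1 ++ line) :: pvLoopA L [] ci2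
  | l :: next0 :: rest, ci =>
    let line := PySem.Str.strip l
    let nl := PySem.Str.strip next0
    if line == "}" && (PySem.Str.startswith nl "else" || PySem.Str.startswith nl "elseif") then
      let ci1 := ci - 1
      let m := "} " ++ nl
      let ci2 := if PySem.Str.endswith m "{" then ci1 + 1 else ci1
      (pvIndentStr L ci1 ++ m) :: pvLoopA L rest ci2
    else
      let ci1 := if PySem.Str.startswith line "}" then ci - 1 else ci
      let ci2 := if PySem.Str.endswith line "{" then ci1 + 1 else ci1
      (pvIndentStr L ci1 ++ line) :: pvLoopA L (next0 :: rest) ci2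

def format_irule_as_tcl (content : String) (indent_level : Int) : String :=
  PySem.Str.replace
    (PySem.Str.join "\n" (pvLoopA indent_level (PySem.Str.splitlines content) 0))
    "}{" "} {"

-- ===== PORT B =====
-- pass 1: merge '}' with a following else/elseif line into a single logical line
def pvMerge : List String → List String
  | [] => []
  | [l] => [PySem.Str.strip l]
  | l :: next0 :: rest =>
    let line := PySem.Str.strip l
    if line == "}" && PySem.Str.startswith (PySem.Str.strip next0) "else" then
      ("} " ++ PySem.Str.strip next0) :: pvMerge rest
    else
      line :: pvMerge (next0 :: rest)

-- pass 2: reindent by brace counting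
def pvIndentPass (L : Int) : List String → Int → List String
  | [], _ => []
  | l :: rest, ci =>
    let ci1 := if PySem.Str.startswith l "}" then ci - 1 else ci
    (pvIndentStr L ci1 ++ l) :: pvIndentPass L rest (if PySem.Str.endswith l "{" then ci1 + 1 else ci1)

def format_irule_as_tcl_alt (content : String) (indent_level : Int) : String :=
  PySem.Str.replace
    (PySem.Str.join "\n" (pvIndentPass indent_level (pvMerge (PySem.Str.splitlines content)) 0))
    "}{" "} {"

-- ===== PRECONDITION & SPEC =====
def Spec_format_irule_as_tcl (content : String) (indent_level : Int) (out : String) : Prop := out = format_irule_as_tcl_alt content indent_level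
instance (content : String) (indent_level : Int) (out : String) : Decidable (Spec_format_irule_as_tcl content indent_level out) := by unfold Spec_format_irule_as_tcl; infer_instance

-- ===== CLAIM (what is proved, stated in full; the proofs are below) =====
def Claim_equal_format_irule_as_tcl : Prop := ∀ (content : String) (indent_level : Int), Dom_format_irule_as_tcl content indent_level → Spec_format_irule_as_tcl content indent_level (format_irule_as_tcl content indent_level)

-- ===== LEMMAS AND PROOFS =====

-- "} " ++ s starts with "}"
theorem pv_startswith_merged (s : String) : PySem.Str.startswith ("} " ++ s) "}" = true := by
  simp [PySem.Str.startswith, PySem.Chars.startswith_iff, String.toList_append]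

-- a line starting with "elseif" also starts with "else"
theorem pv_elseif_imp_else (s : String) (h : PySem.Str.startswith s "elseif" = true) :
    PySem.Str.startswith s "else" = true := by
  simp [PySem.Str.startswith, PySem.Chars.startswith_iff] at *
  exact List.IsPrefix.trans (by decide) h

-- A's merge condition equals B's: the "elseif" disjunct is subsumed by "else"
theorem pv_cond_eq (s : String) :
    (PySem.Str.startswith s "else" || PySem.Str.startswith s "elseif") = PySem.Str.startswith s "else" := by
  cases h : PySem.Str.startswith s "elseif" with
  | true => rw [pv_elseif_imp_else s h]; rfl
  | false => simp

-- the core: A's fused lookahead loop equals B's merge pass followed by B's indent pass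
theorem pv_loop_eq (L : Int) (lines : List String) (ci : Int) :
    pvLoopA L lines ci = pvIndentPass L (pvMerge lines) ci := by
  induction lines using pvMerge.induct generalizing ci with
  | case1 => simp [pvLoopA, pvMerge, pvIndentPass]
  | case2 l => simp [pvLoopA, pvMerge, pvIndentPass]
  | case3 l next0 rest line hc ih =>
    rw [pvLoopA, pvMerge]
    simp only [pv_cond_eq]
    rw [if_pos hc, if_pos hc, pvIndentPass,
        if_pos (pv_startswith_merged (PySem.Str.strip next0)), ih]
  | case4 l next0 rest line hc ih =>
    rw [pvLoopA, pvMerge]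
    simp only [pv_cond_eq]
    rw [if_neg hc, if_neg hc, pvIndentPass, ih]

theorem format_irule_as_tcl_spec : Claim_equal_format_irule_as_tcl := by
  intro content indent_level _
  unfold Spec_format_irule_as_tcl format_irule_as_tcl format_irule_as_tcl_alt
  rw [pv_loop_eq]
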